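-- pv_equiv track=rewrite | github.com/Iska1999/Eye-Tracking-GUI | Summer-2023-ET-Codes-main/ED.py | find_fixation_indices
-- ===== SOURCE A (Python) =====
-- def find_fixation_indices(onset_indices, offset_indices, velocities):
--     fixation_indices=[]
--     mini_lst = []
--
--     #Need 3 while loops to find all the fixation indices in a file.
--     #The first searches for fixation indices before the first onset,
--     #the second searches for fixation indices between the first saccade's offset to the last saccade's onset,
--     #and the third searches for fixation indices after the last saccade's offset
--
--     #initialize list variables for searching for fixation indices
--     fixation_indices=[]
--     mini_lst = []
--     j=0
--     while j < onset_indices[0]: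
--         mini_lst.append(j)
--         j+=1
--     fixation_indices.append(mini_lst)
--
--     for i in range(len(offset_indices)-1):
--         j=offset_indices[i] + 1
--         mini_lst = []
--         while j < onset_indices[i+1]:
--             mini_lst.append(j)
--             j+=1
--         fixation_indices.append(mini_lst)
--
--     j=(offset_indices[len(offset_indices)-1])+1 #go to the index where the last offset was detected as the starting point to find the last collection of fixation indices
--     mini_lst = []
--     while j < len(velocities):#want to search across all velocities past the last saccade's offset so use the filtered velocity list as the structure to base this off of
--         mini_lst.append(j)
--         j+=1
--     fixation_indices.append(mini_lst)
--     return fixation_indices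
-- ===== SOURCE B (Python) =====
-- def find_fixation_indices(onset_indices, offset_indices, velocities):
--     # Single recursive descent consuming the onset/offset lists in lockstep:
--     # each step emits one fixation gap and recurses past the next saccade.
--     def go(start, ons, offs):
--         if not offs:
--             return [list(range(start, len(velocities)))]
--         return [list(range(start, ons[0]))] + go(offs[0] + 1, ons[1:], offs[1:])
--     return go(0, onset_indices, offset_indices)
-- ===== Notes on version B (the rewrite author's own statement) =====
-- stated objective: simpler
-- what changed: Replaces A's three separately-shaped index loops by one short recursive descent that consumes the onset/offset lists in lockstep, emitting one gap per step.
import Mathlib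
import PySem

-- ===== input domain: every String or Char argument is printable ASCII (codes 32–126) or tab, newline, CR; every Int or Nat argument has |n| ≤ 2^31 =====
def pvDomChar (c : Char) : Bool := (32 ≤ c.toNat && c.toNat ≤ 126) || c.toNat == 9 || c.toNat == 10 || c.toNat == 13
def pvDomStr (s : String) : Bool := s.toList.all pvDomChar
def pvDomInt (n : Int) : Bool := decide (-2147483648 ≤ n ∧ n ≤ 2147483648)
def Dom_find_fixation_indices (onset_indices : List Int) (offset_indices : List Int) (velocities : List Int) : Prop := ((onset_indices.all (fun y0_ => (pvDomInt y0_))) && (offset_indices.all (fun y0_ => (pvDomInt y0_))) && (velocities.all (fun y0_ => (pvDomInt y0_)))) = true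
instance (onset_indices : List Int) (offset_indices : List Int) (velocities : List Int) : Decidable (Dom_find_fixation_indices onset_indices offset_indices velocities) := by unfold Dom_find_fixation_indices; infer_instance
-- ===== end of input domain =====

-- B replaces A's three separately-shaped loops by one recursive descent over the onset/offset lists: simpler, same cost.

-- ===== PORT A =====
-- 'j = start; while j < stop: mini_lst.append(j); j += 1' collecting into mini_lst
def pvWhileCollect (j stop : Int) : List Int :=
  if j < stop then j :: pvWhileCollect (j + 1) stop else []
termination_by (stop - j).toNat
decreasing_by omega

def find_fixation_indices (onset_indices : List Int) (offset_indices : List Int) (velocities : List Int) : List (List Int) :=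
  -- first while loop: j from 0 to onset_indices[0]
  let first := pvWhileCollect 0 (PySem.List.pyGetD onset_indices 0 0)
  let fixation_indices := [first]
  -- for i in range(len(offset_indices)-1): inner while from offset_indices[i]+1 to onset_indices[i+1]
  let fixation_indices := (List.range (offset_indices.length - 1)).foldl
    (fun acc (i : Nat) =>
      acc ++ [pvWhileCollect (PySem.List.pyGetD offset_indices ((i : Int)) 0 + 1)
                             (PySem.List.pyGetD onset_indices ((i : Int) + 1) 0)])
    fixation_indices
  -- third while loop: from offset_indices[len-1]+1 to len(velocities)
  fixation_indices ++
    [pvWhileCollect (PySem.List.pyGetD offset_indices ((offset_indices.length : Int) - 1) 0 + 1)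
                    (velocities.length : Int)]

-- ===== PORT B =====
-- 'def go(start, ons, offs)': structural recursion on offs, consuming ons in lockstep
def pvGoB (velLen : Int) (start : Int) (ons : List Int) (offs : List Int) : List (List Int) :=
  match offs with
  | [] => [PySem.List.pyRange start velLen 1]
  | o :: offs' =>
      PySem.List.pyRange start (PySem.List.pyGetD ons 0 0) 1 :: pvGoB velLen (o + 1) ons.tail offs'

def find_fixation_indices_alt (onset_indices : List Int) (offset_indices : List Int) (velocities : List Int) : List (List Int) :=
  pvGoB (velocities.length : Int) 0 onset_indices offset_indices

-- ===== PRECONDITION & SPEC =====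
-- Pre_ excludes exactly the inputs on which A raises IndexError (empty onset/offset list,
-- or fewer onsets than offsets, making onset_indices[i+1] go out of range).
def Pre_find_fixation_indices (onset_indices : List Int) (offset_indices : List Int) (velocities : List Int) : Prop :=
  onset_indices ≠ [] ∧ offset_indices ≠ [] ∧ offset_indices.length ≤ onset_indices.length
instance (onset_indices : List Int) (offset_indices : List Int) (velocities : List Int) : Decidable (Pre_find_fixation_indices onset_indices offset_indices velocities) := by unfold Pre_find_fixation_indices; infer_instance

def pvWitness_find_fixation_indices : List Int × List Int × List Int := ([2, 6], [4, 8], [0, 0, 0, 0, 0, 0, 0, 0, 0, 0])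

def Spec_find_fixation_indices (onset_indices : List Int) (offset_indices : List Int) (velocities : List Int) (out : List (List Int)) : Prop := out = find_fixation_indices_alt onset_indices offset_indices velocities
instance (onset_indices : List Int) (offset_indices : List Int) (velocities : List Int) (out : List (List Int)) : Decidable (Spec_find_fixation_indices onset_indices offset_indices velocities out) := by unfold Spec_find_fixation_indices; infer_instance

-- ===== CLAIM (what is proved, stated in full; the proofs are below) =====
def Claim_equal_find_fixation_indices : Prop := ∀ (onset_indices : List Int) (offset_indices : List Int) (velocities : List Int), Dom_find_fixation_indices onset_indices offset_indices velocities → Pre_find_fixation_indices onset_indices offset_indices velocities → Spec_find_fixation_indices onset_indices offset_indices velocities (find_fixation_indices onset_indices offset_indices velocities)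

-- ===== LEMMAS AND PROOFS =====

-- common intermediate form: the list of gap boundary pairs, mapped through pyRange
def pvZipForm (on off : List Int) (L : Int) : List (List Int) :=
  ((0 :: off.map (fun o => o + 1)).zip (on.take off.length ++ [L])).map
    (fun p => PySem.List.pyRange p.1 p.2 1)

theorem pvWhileCollect_eq_pyRange (j stop : Int) : pvWhileCollect j stop = PySem.List.pyRange j stop 1 := by
  rw [pvWhileCollect]
  split
  · rw [PySem.List.pyRange_one_cons (by omega), pvWhileCollect_eq_pyRange]
  · rw [PySem.List.pyRange_one_eq_nil (by omega)]
termination_by (stop - j).toNat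
decreasing_by omega

theorem pvFoldl_append_map {α β : Type} (f : α → β) (l : List α) (init : List β) :
    l.foldl (fun acc i => acc ++ [f i]) init = init ++ l.map f := by
  induction l generalizing init with
  | nil => simp
  | cons x xs ih => simp [List.foldl, ih]

theorem pvGetD_nat (xs : List Int) (k : Nat) (h : k < xs.length) (d : Int) :
    PySem.List.pyGetD xs (k : Int) d = xs[k] := by
  rw [PySem.List.pyGetD_eq_getElem xs d (by positivity) (by exact_mod_cast h)]
  simp

-- A equals the zip form
theorem pvA_eq_zipForm (on off vel : List Int) (hon : on ≠ []) (hoff : off ≠ [])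
    (hlen : off.length ≤ on.length) :
    find_fixation_indices on off vel = pvZipForm on off (vel.length : Int) := by
  unfold find_fixation_indices pvZipForm
  simp only [pvFoldl_append_map, pvWhileCollect_eq_pyRange]
  have hoffl : 0 < off.length := List.length_pos_iff.mpr hoff
  have honl : 0 < on.length := List.length_pos_iff.mpr hon
  have hmin : min off.length on.length = off.length := Nat.min_eq_left hlen
  apply List.ext_getElem?
  intro i
  simp only [List.zip_eq_zipWith, List.getElem?_append, List.getElem?_map,
    List.getElem?_zipWith, List.getElem?_take, List.length_append, List.length_map,
    List.length_range, List.length_cons, List.length_take, List.length_nil, hmin]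
  rcases Nat.eq_zero_or_pos i with hi0 | hi1
  · -- i = 0 : first segment
    subst hi0
    rw [if_pos (by omega), if_pos (by omega), if_pos (by omega), if_pos hoffl]
    simp only [List.getElem?_cons_zero, List.getElem?_eq_getElem honl]
    have h0 : PySem.List.pyGetD on 0 0 = on[0] := pvGetD_nat on 0 honl 0
    simp [h0]
  · rcases Nat.lt_or_ge i off.length with him | hlast
    · -- 1 ≤ i < off.length : middle segments
      rw [if_pos (by omega), if_neg (by omega), if_pos (by omega), if_pos (by omega)]
      obtain ⟨k, rfl⟩ : ∃ k, i = k + 1 := ⟨i - 1, by omega⟩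
      have hk1 : k < off.length - 1 := by omega
      have hk2 : k < off.length := by omega
      have hi' : k + 1 < on.length := by omega
      rw [List.getElem?_eq_getElem (by simpa using hk1), List.getElem?_cons_succ,
          List.getElem?_map, List.getElem?_eq_getElem hk2, List.getElem?_eq_getElem hi']
      simp only [List.getElem_range, Option.map_some]
      have h1 : PySem.List.pyGetD off (k : Int) 0 = off[k] := pvGetD_nat off k hk2 0
      have h2 : PySem.List.pyGetD on ((k : Int) + 1) 0 = on[k + 1] := by
        have := pvGetD_nat on (k + 1) hi' 0
        simpa [Nat.cast_add] using this
      simp [h1, h2]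
    · rcases Nat.eq_or_lt_of_le hlast with hieq | hbig
      · -- i = off.length : last segment
        rw [if_neg (by omega), if_neg (by omega)]
        subst hieq
        have hidx : off.length - (0 + 1 + (off.length - 1)) = 0 := by omega
        rw [hidx, List.getElem?_cons_zero]
        obtain ⟨k, hk⟩ : ∃ k, off.length = k + 1 := ⟨off.length - 1, by omega⟩
        rw [hk, List.getElem?_cons_succ, List.getElem?_map,
            List.getElem?_eq_getElem (by omega : k < off.length), Nat.sub_self,
            List.getElem?_cons_zero]
        simp
        rw [List.getElem?_eq_getElem (show k < off.length by omega)]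
        simp
      · -- i > off.length : both sides none
        rw [if_neg (by omega), if_neg (by omega)]
        rw [List.getElem?_eq_none (by simp; omega)]
        obtain ⟨k, rfl⟩ : ∃ k, i = k + 1 := ⟨i - 1, by omega⟩
        rw [List.getElem?_cons_succ, List.getElem?_eq_none (by simp; omega)]
        simp

-- B's recursion equals the zip form (induction on offs, consuming ons in lockstep)
theorem pvGoB_eq_zipForm (L : Int) (offs : List Int) : ∀ (start : Int) (ons : List Int),
    offs.length ≤ ons.length →
    pvGoB L start ons offs =
      ((start :: offs.map (fun o => o + 1)).zip (ons.take offs.length ++ [L])).map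
        (fun p => PySem.List.pyRange p.1 p.2 1) := by
  induction offs with
  | nil => intro start ons _; simp [pvGoB]
  | cons o offs' ih =>
      intro start ons hlen
      cases ons with
      | nil => simp at hlen
      | cons a ons' =>
          simp only [pvGoB, List.tail_cons]
          have h0 : PySem.List.pyGetD (a :: ons') 0 0 = a := by
            have := pvGetD_nat (a :: ons') 0 (by simp) 0
            simpa using this
          rw [h0, ih (o + 1) ons' (by simpa using hlen)]
          simp [List.take_succ_cons]

theorem pvB_eq_zipForm (on off vel : List Int) (hlen : off.length ≤ on.length) :
    find_fixation_indices_alt on off vel = pvZipForm on off (vel.length : Int) := by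
  unfold find_fixation_indices_alt pvZipForm
  exact pvGoB_eq_zipForm (vel.length : Int) off 0 on hlen

-- ===== VERDICT (by name: the statement is the Claim_ definition above) =====
theorem find_fixation_indices_spec : Claim_equal_find_fixation_indices := by
  unfold Claim_equal_find_fixation_indices
  intro on off vel _ hpre
  obtain ⟨hon, hoff, hlen⟩ := hpre
  unfold Spec_find_fixation_indices
  rw [pvA_eq_zipForm on off vel hon hoff hlen, pvB_eq_zipForm on off vel hlen]
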